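-- pv_equiv track=rewrite | github.com/rienajoy/CaseManagementSystem | backend/app/services/nlp/extractor.py | get_affidavit_body_only
-- ===== SOURCE A (Python) =====
-- def get_affidavit_body_only(text: str) -> str:
--     if not text:
--         return text
--
--     split_markers = [
--         "IN WITNESS WHEREOF",
--         "SUBSCRIBED AND SWORN",
--         "SUPPORTING DOCUMENTARY EVIDENCE",
--     ]
--
--     upper_text = text.upper()
--     cut_positions = []
--
--     for marker in split_markers:
--         idx = upper_text.find(marker)
--         if idx != -1:
--             cut_positions.append(idx)
--
--     if cut_positions:
--         return text[:min(cut_positions)]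
--
--     return text
-- ===== SOURCE B (Python) =====
-- def get_affidavit_body_only(text: str) -> str:
--     markers = (
--         "IN WITNESS WHEREOF",
--         "SUBSCRIBED AND SWORN",
--         "SUPPORTING DOCUMENTARY EVIDENCE",
--     )
--     up = text.upper()
--     for i in range(len(up)):
--         if any(up.startswith(m, i) for m in markers):
--             return text[:i]
--     return text
-- ===== Notes on version B (the rewrite author's own statement) =====
-- stated objective: alternative
-- what changed: Replaces A's three whole-string .find scans plus a min() over the collected positions with a single left-to-right scan over positions that returns at the first index where any marker starts, so no list of candidate cut positions is ever built.
import Mathlib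
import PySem

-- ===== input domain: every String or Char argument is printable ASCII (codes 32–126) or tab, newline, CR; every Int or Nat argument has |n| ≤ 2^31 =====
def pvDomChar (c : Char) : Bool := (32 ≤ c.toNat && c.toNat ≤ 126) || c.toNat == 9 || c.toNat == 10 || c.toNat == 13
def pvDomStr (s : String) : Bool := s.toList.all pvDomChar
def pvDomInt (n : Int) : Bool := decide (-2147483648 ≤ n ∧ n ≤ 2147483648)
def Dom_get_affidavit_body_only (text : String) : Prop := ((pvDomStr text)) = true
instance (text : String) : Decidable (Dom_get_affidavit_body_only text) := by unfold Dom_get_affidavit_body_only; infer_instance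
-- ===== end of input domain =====

-- B replaces A's three whole-string .find scans + min() with one left-to-right scan over
-- suffix positions that returns at the earliest position where any marker matches (objective: alternative).


-- ===== PORT A =====
def splitMarkers : List String :=
  ["IN WITNESS WHEREOF", "SUBSCRIBED AND SWORN", "SUPPORTING DOCUMENTARY EVIDENCE"]

def get_affidavit_body_only (text : String) : String :=
  if PySem.Str.len text = 0 then text
  else
    let upper_text := PySem.Str.upper text
    let cut_positions : List Int := splitMarkers.foldl
      (fun acc marker =>
        let idx := PySem.Str.find upper_text marker
        if idx ≠ -1 then acc ++ [idx] else acc) []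
    match PySem.List.min? cut_positions (fun x => x) with
    | some m => PySem.Str.slice text none (some m)
    | none => text

-- ===== PORT B =====
def altMarkers : List (List Char) :=
  [['I', 'N', ' ', 'W', 'I', 'T', 'N', 'E', 'S', 'S', ' ', 'W', 'H', 'E', 'R', 'E', 'O', 'F'],
   ['S', 'U', 'B', 'S', 'C', 'R', 'I', 'B', 'E', 'D', ' ', 'A', 'N', 'D', ' ', 'S', 'W', 'O', 'R', 'N'],
   ['S', 'U', 'P', 'P', 'O', 'R', 'T', 'I', 'N', 'G', ' ', 'D', 'O', 'C', 'U', 'M', 'E', 'N', 'T', 'A', 'R', 'Y', ' ', 'E', 'V', 'I', 'D', 'E', 'N', 'C', 'E']]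

-- Source B's loop 'for i in range(len(up)): if any(up.startswith(m, i) for m in markers): return text[:i]'
-- as a structural scan over the suffixes of up; 'some i' = the first i at which a marker starts.
def altScan (ms : List (List Char)) : List Char → Option Nat
  | [] => none
  | c :: rest =>
    if ms.any (fun m => PySem.Chars.startswith (c :: rest) m) then some 0
    else (altScan ms rest).map (· + 1)

def get_affidavit_body_only_alt (text : String) : String :=
  match altScan altMarkers (PySem.Chars.upper text.toList) with
  | some i => String.ofList (text.toList.take i)
  | none => text

-- ===== PRECONDITION & SPEC =====
def Spec_get_affidavit_body_only (text : String) (out : String) : Prop := out = get_affidavit_body_only_alt text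
instance (text : String) (out : String) : Decidable (Spec_get_affidavit_body_only text out) := by unfold Spec_get_affidavit_body_only; infer_instance

-- ===== CLAIM (what is proved, stated in full; the proofs are below) =====
def Claim_equal_get_affidavit_body_only : Prop := ∀ (text : String), Dom_get_affidavit_body_only text → Spec_get_affidavit_body_only text (get_affidavit_body_only text)

-- ===== LEMMAS AND PROOFS =====

lemma altScan_none_of (ms : List (List Char)) (u : List Char)
    (h : ∀ j, ms.any (fun m => PySem.Chars.startswith (u.drop j) m) = false) :
    altScan ms u = none := by
  induction u with
  | nil => rfl
  | cons c rest ih =>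
    have h0 := h 0
    simp only [List.drop_zero] at h0
    have hrest : altScan ms rest = none := by
      apply ih
      intro j
      have := h (j + 1)
      simpa using this
    simp [altScan, h0, hrest]

lemma altScan_some_of (ms : List (List Char)) (u : List Char) (n : Nat)
    (hn : n < u.length)
    (hmatch : ms.any (fun m => PySem.Chars.startswith (u.drop n) m) = true)
    (hbefore : ∀ j, j < n → ms.any (fun m => PySem.Chars.startswith (u.drop j) m) = false) :
    altScan ms u = some n := by
  induction u generalizing n with
  | nil => simp at hn
  | cons c rest ih =>
    cases n with
    | zero =>
      simp only [List.drop_zero] at hmatch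
      simp [altScan, hmatch]
    | succ k =>
      have h0 := hbefore 0 (Nat.succ_pos k)
      simp only [List.drop_zero] at h0
      have hrest : altScan ms rest = some k := by
        apply ih k (by simpa using hn) (by simpa using hmatch)
        intro j hj
        have := hbefore (j + 1) (by omega)
        simpa using this
      simp [altScan, h0, hrest]

-- the k = 0 instance of PySem.Chars.findFrom_natCast_spec: where .find's hit is, and nothing earlier
lemma find_spec0 (s sub : List Char) (h : PySem.Chars.find s sub ≠ -1) :
    sub <+: s.drop (PySem.Chars.find s sub).toNat ∧
      ∀ i, i < (PySem.Chars.find s sub).toNat → ¬ sub <+: s.drop i := by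
  have hs := PySem.Chars.findFrom_natCast_spec s sub 0 (Nat.zero_le _) (by simpa using h)
  simp only [Nat.cast_zero, PySem.Chars.findFrom_zero] at hs
  exact ⟨hs.2.1, fun i hi => hs.2.2 i (Nat.zero_le _) hi⟩

lemma no_prefix_of_find_neg (s sub : List Char) (h : PySem.Chars.find s sub = -1) :
    ∀ j, ¬ sub <+: s.drop j := by
  intro j hp
  have hin : PySem.Chars.isIn sub s = true :=
    (PySem.Chars.exists_prefix_drop_iff_isIn sub s).mp ⟨j, hp⟩
  exact (PySem.Chars.find_eq_neg_one_iff s sub).mp h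
    ((PySem.Chars.isIn_iff_infix sub s).mp hin)

lemma slice_eq_take (text : String) (m : Int) (h : 0 ≤ m) :
    PySem.Str.slice text none (some m) = String.ofList (text.toList.take m.toNat) := by
  apply String.toList_inj.mp
  rw [PySem.Str.toList_slice, String.toList_ofList, PySem.Chars.slice_eq_listSlice,
    PySem.List.slice_to _ h]

-- B returns text[:m] whenever m is the value of .find for some marker and is minimal
-- among the markers that are found at all.
lemma alt_eq_cut (text : String) (m : Int) (hm0 : 0 ≤ m)
    (hex : ∃ mk ∈ altMarkers, PySem.Chars.find (PySem.Chars.upper text.toList) mk = m)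
    (hmin : ∀ mk ∈ altMarkers,
      PySem.Chars.find (PySem.Chars.upper text.toList) mk = -1 ∨
        m ≤ PySem.Chars.find (PySem.Chars.upper text.toList) mk) :
    get_affidavit_body_only_alt text = String.ofList (text.toList.take m.toNat) := by
  set u := PySem.Chars.upper text.toList with hu
  obtain ⟨mk, hmk, hfind⟩ := hex
  have hne : PySem.Chars.find u mk ≠ -1 := by rw [hfind]; omega
  obtain ⟨hpref, _⟩ := find_spec0 u mk hne
  rw [hfind] at hpref
  have hmknil : mk ≠ [] := by
    rcases (by simpa [altMarkers] using hmk : mk = _ ∨ mk = _ ∨ mk = _) with h | h | h <;>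
      (rw [h]; decide)
  have hlen : m.toNat < u.length := by
    by_contra hc
    have : u.drop m.toNat = [] := List.drop_eq_nil_iff.mpr (by omega)
    rw [this] at hpref
    exact hmknil (List.prefix_nil.mp hpref)
  have hmatch : altMarkers.any (fun mk => PySem.Chars.startswith (u.drop m.toNat) mk) = true :=
    List.any_eq_true.mpr ⟨mk, hmk, (PySem.Chars.startswith_iff _ _).mpr hpref⟩
  have hbefore : ∀ j, j < m.toNat →
      altMarkers.any (fun mk => PySem.Chars.startswith (u.drop j) mk) = false := by
    intro j hj
    apply List.any_eq_false.mpr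
    intro mk' hmk'
    rw [PySem.Chars.startswith_iff]
    intro hp
    rcases hmin mk' hmk' with hneg | hle
    · exact no_prefix_of_find_neg u mk' hneg j hp
    · have hne' : PySem.Chars.find u mk' ≠ -1 := by omega
      have hj' : j < (PySem.Chars.find u mk').toNat := by omega
      exact (find_spec0 u mk' hne').2 j hj' hp
  have hscan := altScan_some_of altMarkers u m.toNat hlen hmatch hbefore
  unfold get_affidavit_body_only_alt
  rw [← hu, hscan]

-- ===== VERDICT (by name: the statement is the Claim_ definition above) =====
theorem get_affidavit_body_only_spec : Claim_equal_get_affidavit_body_only := by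
  unfold Claim_equal_get_affidavit_body_only
  intro text _
  unfold Spec_get_affidavit_body_only
  by_cases hemp : text.toList = []
  · have hA : get_affidavit_body_only text = text := by
      unfold get_affidavit_body_only
      rw [if_pos (by simp [PySem.Str.len_eq, hemp])]
    have hB : get_affidavit_body_only_alt text = text := by
      unfold get_affidavit_body_only_alt
      rw [hemp]
      rfl
    rw [hA, hB]
  · have hA : get_affidavit_body_only text =
        (let cut_positions : List Int := splitMarkers.foldl
          (fun acc marker =>
            let idx := PySem.Str.find (PySem.Str.upper text) marker
            if idx ≠ -1 then acc ++ [idx] else acc) []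
        match PySem.List.min? cut_positions (fun x => x) with
        | some m => PySem.Str.slice text none (some m)
        | none => text) := by
      unfold get_affidavit_body_only
      rw [if_neg (by simp [PySem.Str.len_eq]; intro h; exact hemp (by rw [h]; rfl))]
    rw [hA]
    set u := PySem.Chars.upper text.toList with hu
    have hf : ∀ mk : String, PySem.Str.find (PySem.Str.upper text) mk =
        PySem.Chars.find u mk.toList := by
      intro mk
      rw [PySem.Str.find_eq, PySem.Str.toList_upper]
    have hl1 : "IN WITNESS WHEREOF".toList = ['I', 'N', ' ', 'W', 'I', 'T', 'N', 'E', 'S', 'S', ' ', 'W', 'H', 'E', 'R', 'E', 'O', 'F'] := by decide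
    have hl2 : "SUBSCRIBED AND SWORN".toList = ['S', 'U', 'B', 'S', 'C', 'R', 'I', 'B', 'E', 'D', ' ', 'A', 'N', 'D', ' ', 'S', 'W', 'O', 'R', 'N'] := by decide
    have hl3 : "SUPPORTING DOCUMENTARY EVIDENCE".toList = ['S', 'U', 'P', 'P', 'O', 'R', 'T', 'I', 'N', 'G', ' ', 'D', 'O', 'C', 'U', 'M', 'E', 'N', 'T', 'A', 'R', 'Y', ' ', 'E', 'V', 'I', 'D', 'E', 'N', 'C', 'E'] := by decide
    set f1 := PySem.Chars.find u ['I', 'N', ' ', 'W', 'I', 'T', 'N', 'E', 'S', 'S', ' ', 'W', 'H', 'E', 'R', 'E', 'O', 'F'] with hf1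
    set f2 := PySem.Chars.find u ['S', 'U', 'B', 'S', 'C', 'R', 'I', 'B', 'E', 'D', ' ', 'A', 'N', 'D', ' ', 'S', 'W', 'O', 'R', 'N'] with hf2
    set f3 := PySem.Chars.find u ['S', 'U', 'P', 'P', 'O', 'R', 'T', 'I', 'N', 'G', ' ', 'D', 'O', 'C', 'U', 'M', 'E', 'N', 'T', 'A', 'R', 'Y', ' ', 'E', 'V', 'I', 'D', 'E', 'N', 'C', 'E'] with hf3
    have hb1 := PySem.Chars.neg_one_le_find u ['I', 'N', ' ', 'W', 'I', 'T', 'N', 'E', 'S', 'S', ' ', 'W', 'H', 'E', 'R', 'E', 'O', 'F']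
    have hb2 := PySem.Chars.neg_one_le_find u ['S', 'U', 'B', 'S', 'C', 'R', 'I', 'B', 'E', 'D', ' ', 'A', 'N', 'D', ' ', 'S', 'W', 'O', 'R', 'N']
    have hb3 := PySem.Chars.neg_one_le_find u ['S', 'U', 'P', 'P', 'O', 'R', 'T', 'I', 'N', 'G', ' ', 'D', 'O', 'C', 'U', 'M', 'E', 'N', 'T', 'A', 'R', 'Y', ' ', 'E', 'V', 'I', 'D', 'E', 'N', 'C', 'E']
    rw [← hf1] at hb1; rw [← hf2] at hb2; rw [← hf3] at hb3
    simp only [splitMarkers, List.foldl, hf, hl1, hl2, hl3, ← hf1, ← hf2, ← hf3]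
    by_cases h1 : f1 = -1 <;> by_cases h2 : f2 = -1 <;> by_cases h3 : f3 = -1 <;>
      simp only [h1, h2, h3, ne_eq, not_true_eq_false, not_false_eq_true, if_true, if_false,
        List.nil_append, List.cons_append, PySem.List.min?, List.foldl] <;>
      first
      | -- all three finds are -1: no marker occurs, both sides give text back
        (refine (?_ : get_affidavit_body_only_alt text = text).symm
         unfold get_affidavit_body_only_alt
         rw [← hu, altScan_none_of]
         intro j
         apply List.any_eq_false.mpr
         intro mk' hmk'
         rw [PySem.Chars.startswith_iff]
         rcases (by simpa [altMarkers] using hmk' : mk' = _ ∨ mk' = _ ∨ mk' = _) with h | h | h <;>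
           (rw [h]
            first
            | exact no_prefix_of_find_neg u _ h1 j
            | exact no_prefix_of_find_neg u _ h2 j
            | exact no_prefix_of_find_neg u _ h3 j))
      | -- at least one marker found: finish each min?-leaf with the matching f_i
        ((try split_ifs) <;> (try dsimp only) <;> (try split_ifs) <;> (try dsimp only) <;>
          first
          | (rw [alt_eq_cut text f1 (by omega)
              (by simp only [altMarkers, List.mem_cons, List.not_mem_nil, or_false]
                  exact ⟨_, Or.inl rfl, hf1.symm⟩)
              (by intro mk' hmk'
                  rcases (by simpa [altMarkers] using hmk' : mk' = _ ∨ mk' = _ ∨ mk' = _)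
                    with h | h | h <;> subst h
                  · exact (show f1 = -1 ∨ f1 ≤ f1 by omega)
                  · exact (show f2 = -1 ∨ f1 ≤ f2 by omega)
                  · exact (show f3 = -1 ∨ f1 ≤ f3 by omega)),
            slice_eq_take text f1 (by omega)])
          | (rw [alt_eq_cut text f2 (by omega)
              (by simp only [altMarkers, List.mem_cons, List.not_mem_nil, or_false]
                  exact ⟨_, Or.inr (Or.inl rfl), hf2.symm⟩)
              (by intro mk' hmk'
                  rcases (by simpa [altMarkers] using hmk' : mk' = _ ∨ mk' = _ ∨ mk' = _)
                    with h | h | h <;> subst h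
                  · exact (show f1 = -1 ∨ f2 ≤ f1 by omega)
                  · exact (show f2 = -1 ∨ f2 ≤ f2 by omega)
                  · exact (show f3 = -1 ∨ f2 ≤ f3 by omega)),
            slice_eq_take text f2 (by omega)])
          | (rw [alt_eq_cut text f3 (by omega)
              (by simp only [altMarkers, List.mem_cons, List.not_mem_nil, or_false]
                  exact ⟨_, Or.inr (Or.inr rfl), hf3.symm⟩)
              (by intro mk' hmk'
                  rcases (by simpa [altMarkers] using hmk' : mk' = _ ∨ mk' = _ ∨ mk' = _)
                    with h | h | h <;> subst h
                  · exact (show f1 = -1 ∨ f3 ≤ f1 by omega)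
                  · exact (show f2 = -1 ∨ f3 ≤ f2 by omega)
                  · exact (show f3 = -1 ∨ f3 ≤ f3 by omega)),
            slice_eq_take text f3 (by omega)]))
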